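-- pv_equiv track=rewrite | github.com/yeonsikC/Programmers | 모의고사.py | solution
-- ===== SOURCE A (Python) =====
-- def solution(answers):
--     answer = []
--     a = [1,2,3,4,5]
--     b = [2,1,2,3,2,4,2,5]
--     c = [3,3,1,1,2,2,4,4,5,5]
--     a_point = 0
--     b_point = 0
--     c_point = 0
--
--     for i in range(len(answers)):
--         if answers[i] == a[i%5]:
--             a_point += 1
--         if answers[i] == b[i%8]:
--             b_point += 1
--         if answers[i] == c[i%10]:
--             c_point += 1
--
--     total_point = [a_point, b_point, c_point]
--     for i in range(3):
--         if total_point[i] == max(total_point):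
--             answer.append(i+1)
--     return answer
-- ===== SOURCE B (Python) =====
-- def solution(answers):
--     patterns = [[1, 2, 3, 4, 5],
--                 [2, 1, 2, 3, 2, 4, 2, 5],
--                 [3, 3, 1, 1, 2, 2, 4, 4, 5, 5]]
--     scores = []
--     for p in patterns:
--         # histogram of (position residue, answer value); the pattern is
--         # consulted only len(p) times, never once per answer
--         hist = {}
--         for i, x in enumerate(answers):
--             key = (i % len(p), x)
--             hist[key] = hist.get(key, 0) + 1
--         scores.append(sum(hist.get((r, v), 0) for r, v in enumerate(p)))
--     best = max(scores)
--     return [k + 1 for k in range(3) if scores[k] == best]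
-- ===== Notes on version B (the rewrite author's own statement) =====
-- stated objective: alternative
-- what changed: Instead of comparing every answer to each pattern, B builds per-pattern histograms keyed by (index residue, answer value) in one dict pass, then reads each score off with only len(pattern) dictionary lookups; winners are collected with a comprehension.
import Mathlib
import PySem

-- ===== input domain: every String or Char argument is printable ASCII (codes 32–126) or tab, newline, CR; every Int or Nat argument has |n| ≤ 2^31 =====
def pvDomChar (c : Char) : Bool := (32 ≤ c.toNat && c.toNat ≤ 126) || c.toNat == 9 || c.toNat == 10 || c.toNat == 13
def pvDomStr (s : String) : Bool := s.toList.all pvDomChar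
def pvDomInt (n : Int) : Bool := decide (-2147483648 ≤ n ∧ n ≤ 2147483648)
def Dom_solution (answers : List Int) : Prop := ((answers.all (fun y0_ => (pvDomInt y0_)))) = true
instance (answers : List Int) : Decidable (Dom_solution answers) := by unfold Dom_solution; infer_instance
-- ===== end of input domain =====

-- B replaces A's per-answer pattern comparisons by a per-pattern histogram keyed by
-- (index residue, answer value); each score is then read off with len(pattern) dict lookups.

-- ===== PORT A =====
-- literal port of A: one index loop over range(len(answers)) updating three counters,
-- then a range(3) loop appending the winners (index always in range, so pyGetD default is unreached)
def solution (answers : List Int) : List Int :=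
  let a : List Int := [1,2,3,4,5]
  let b : List Int := [2,1,2,3,2,4,2,5]
  let c : List Int := [3,3,1,1,2,2,4,4,5,5]
  let pts : Int × Int × Int :=
    (PySem.List.pyRange 0 (answers.length : Int) 1).foldl
      (fun (p : Int × Int × Int) i =>
        let p1 := if PySem.List.pyGetD answers i 0 = PySem.List.pyGetD a (PySem.Int.mod i 5) 0 then p.1 + 1 else p.1
        let p2 := if PySem.List.pyGetD answers i 0 = PySem.List.pyGetD b (PySem.Int.mod i 8) 0 then p.2.1 + 1 else p.2.1
        let p3 := if PySem.List.pyGetD answers i 0 = PySem.List.pyGetD c (PySem.Int.mod i 10) 0 then p.2.2 + 1 else p.2.2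
        (p1, p2, p3)) (0, 0, 0)
  let total : List Int := [pts.1, pts.2.1, pts.2.2]
  (PySem.List.pyRange 0 3 1).foldl
    (fun acc i =>
      if PySem.List.pyGetD total i 0 = (PySem.List.max? total id).getD 0 then acc ++ [i + 1] else acc)
    []

-- ===== PORT B =====
-- hist[key] = hist.get(key, 0) + 1  over  key = (i % len(p), x)  for i, x in enumerate(answers)
def pvHist (plen : Nat) (answers : List Int) : PySem.Dict (Int × Int) Int :=
  (PySem.List.enumerate answers).foldl
    (fun d q =>
      d.insert (PySem.Int.mod q.1 (plen : Int), q.2)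
        (d.getD (PySem.Int.mod q.1 (plen : Int), q.2) 0 + 1))
    PySem.Dict.empty

-- sum(hist.get((r, v), 0) for r, v in enumerate(p))
def pvScore (p : List Int) (answers : List Int) : Int :=
  ((PySem.List.enumerate p).map (fun rv => (pvHist p.length answers).getD (rv.1, rv.2) 0)).sum

def solution_alt (answers : List Int) : List Int :=
  let patterns : List (List Int) :=
    [[1,2,3,4,5], [2,1,2,3,2,4,2,5], [3,3,1,1,2,2,4,4,5,5]]
  let scores : List Int := patterns.foldl (fun acc p => acc ++ [pvScore p answers]) []
  let best : Int := (PySem.List.max? scores id).getD 0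
  (PySem.List.pyRange 0 3 1).filterMap
    (fun k => if PySem.List.pyGetD scores k 0 = best then some (k + 1) else none)

-- ===== PRECONDITION & SPEC =====
def Spec_solution (answers : List Int) (out : List Int) : Prop := out = solution_alt answers
instance (answers : List Int) (out : List Int) : Decidable (Spec_solution answers out) := by unfold Spec_solution; infer_instance

-- ===== CLAIM (what is proved, stated in full; the proofs are below) =====
def Claim_equal_solution : Prop := ∀ (answers : List Int), Dom_solution answers → Spec_solution answers (solution answers)

-- ===== LEMMAS AND PROOFS =====

-- A's index loop over a suffix equals a fold over the enumerate of that suffix.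
theorem foldl_pyRange_eq_foldl_enumerate {β : Type} (g : β → Int → Int → β) :
    ∀ (ys xs : List Int) (s : Int) (init : β), 0 ≤ s →
      (∀ k : Nat, k < ys.length → PySem.List.pyGetD xs (s + (k : Int)) 0 = ys.getD k 0) →
      (PySem.List.pyRange s (s + (ys.length : Int)) 1).foldl
        (fun acc i => g acc i (PySem.List.pyGetD xs i 0)) init
      = (PySem.List.enumerate ys s).foldl (fun acc q => g acc q.1 q.2) init := by
  intro ys
  induction ys with
  | nil => intro xs s init hs h; simp [PySem.List.enumerate]
  | cons y ys ih =>
    intro xs s init hs h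
    rw [PySem.List.pyRange_one_cons (by simp), PySem.List.enumerate_cons]
    simp only [List.foldl_cons]
    have h0 := h 0 (by simp)
    simp at h0
    rw [h0]
    have : s + ((y :: ys).length : Int) = (s + 1) + (ys.length : Int) := by simp; omega
    rw [this]
    exact ih xs (s + 1) _ (by omega) (fun k hk => by
      have := h (k + 1) (by simpa using Nat.succ_lt_succ hk)
      simpa [add_assoc, add_comm 1 (k : Int)] using this)

-- the fused three-counter fold equals the three per-pattern counts
theorem fused_eq_counts (P1 P2 P3 : Int × Int → Prop) [DecidablePred P1] [DecidablePred P2] [DecidablePred P3] :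
    ∀ (l : List (Int × Int)) (x y z : Int),
      l.foldl (fun (p : Int × Int × Int) q =>
        (if P1 q then p.1 + 1 else p.1,
         if P2 q then p.2.1 + 1 else p.2.1,
         if P3 q then p.2.2 + 1 else p.2.2)) (x, y, z)
      = (x + (l.countP (fun q => decide (P1 q)) : Nat),
         y + (l.countP (fun q => decide (P2 q)) : Nat),
         z + (l.countP (fun q => decide (P3 q)) : Nat)) := by
  intro l
  induction l with
  | nil => intro x y z; simp
  | cons q l ih =>
    intro x y z
    simp only [List.foldl_cons, List.countP_cons, ih]
    by_cases h1 : P1 q <;> by_cases h2 : P2 q <;> by_cases h3 : P3 q <;>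
      simp [h1, h2, h3] <;> omega

-- a 0/1 indicator summed along enumerate pat picks out exactly one slot
theorem pv_ind_sum (pat : List Int) :
    ∀ (s m x : Int),
      ((PySem.List.enumerate pat s).map (fun rv => if rv = (m, x) then (1:Int) else 0)).sum
      = if s ≤ m ∧ m < s + (pat.length : Int) ∧ x = pat.getD (m - s).toNat 0 then 1 else 0 := by
  induction pat with
  | nil =>
    intro s m x
    rw [PySem.List.enumerate_nil]
    simp only [List.map_nil, List.sum_nil, List.length_nil, Nat.cast_zero, add_zero]
    split_ifs with h
    · exfalso; omega
    · rfl
  | cons v pat ih =>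
    intro s m x
    rw [PySem.List.enumerate_cons]
    simp only [List.map_cons, List.sum_cons, ih (s+1) m x, List.length_cons, Prod.mk.injEq]
    by_cases hm : m = s
    · subst hm
      rw [show (m - m).toNat = 0 from by omega]
      simp only [List.getD_cons_zero]
      rw [if_neg (show ¬(m + 1 ≤ m ∧ m < m + 1 + (pat.length : Int) ∧
            x = pat.getD (m - (m + 1)).toNat 0) from fun h => absurd h.1 (by omega))]
      by_cases hx : x = v
      · rw [if_pos ⟨trivial, hx.symm⟩, if_pos ⟨le_refl m, by push_cast; omega, hx⟩]
        norm_num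
      · rw [if_neg (fun h => hx h.2.symm), if_neg (fun h => hx h.2.2)]
        norm_num
    · rw [if_neg (fun h => hm h.1.symm), zero_add]
      by_cases hs : s + 1 ≤ m
      · have hk : (m - s).toNat = (m - (s + 1)).toNat + 1 := by omega
        rw [hk, List.getD_cons_succ]
        refine if_congr ⟨fun h => ⟨by omega, by push_cast; omega, h.2.2⟩,
          fun h => ⟨hs, by omega, h.2.2⟩⟩ rfl rfl
      · rw [if_neg (fun h => hs h.1), if_neg (fun h => absurd h.1 (by omega))]

-- sum of per-slot counts over enumerate pat = one countP over the keyed list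
theorem pv_sum_count (pat : List Int) :
    ∀ (L : List (Int × Int)),
      ((PySem.List.enumerate pat 0).map (fun rv => (L.count rv : Int))).sum
      = (L.countP (fun q =>
          decide (0 ≤ q.1 ∧ q.1 < (pat.length : Int) ∧ q.2 = pat.getD q.1.toNat 0)) : Nat) := by
  intro L
  induction L with
  | nil => simp
  | cons q L ih =>
    have hc : ∀ rv : Int × Int, (((q :: L).count rv : Nat) : Int)
        = (L.count rv : Int) + if rv = q then 1 else 0 := by
      intro rv
      rw [List.count_cons]
      split_ifs with h1 <;> simp_all [beq_iff_eq]
    simp only [hc]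
    rw [PySem.List.sum_map_add_int]
    have hq : (fun rv : Int × Int => if rv = q then (1:Int) else 0)
        = (fun rv : Int × Int => if rv = (q.1, q.2) then (1:Int) else 0) := by
      funext rv; rw [Prod.mk.eta]
    rw [ih, hq, pv_ind_sum pat 0 q.1 q.2, List.countP_cons]
    simp only [zero_add, sub_zero, decide_eq_true_eq]
    split_ifs <;> push_cast <;> omega

-- B's histogram score equals A's direct match count, for any pattern of positive length
theorem pvScore_eq (pat : List Int) (hlen : 0 < pat.length) (answers : List Int) :
    pvScore pat answers
    = ((PySem.List.enumerate answers).countP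
        (fun q => decide (q.2 = PySem.List.pyGetD pat (PySem.Int.mod q.1 (pat.length : Int)) 0)) : Nat) := by
  have hgetD : ∀ rv : Int × Int,
      (pvHist pat.length answers).getD rv 0
      = (((PySem.List.enumerate answers).map
          (fun q => (PySem.Int.mod q.1 (pat.length : Int), q.2))).count rv : Int) := by
    intro rv
    unfold pvHist
    rw [show (PySem.List.enumerate answers).foldl
          (fun d q =>
            d.insert (PySem.Int.mod q.1 ((pat.length : Nat) : Int), q.2)
              (d.getD (PySem.Int.mod q.1 ((pat.length : Nat) : Int), q.2) 0 + 1))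
          (PySem.Dict.empty : PySem.Dict (Int × Int) Int)
        = ((PySem.List.enumerate answers).map
            (fun q => (PySem.Int.mod q.1 (pat.length : Int), q.2))).foldl
            (fun d x => d.insert x (d.getD x 0 + 1)) (PySem.Dict.empty : PySem.Dict (Int × Int) Int) from
          (List.foldl_map
            (f := fun q : Int × Int => (PySem.Int.mod q.1 ((pat.length : Nat) : Int), q.2))
            (g := fun (d : PySem.Dict (Int × Int) Int) x => d.insert x (d.getD x 0 + 1))
            (l := PySem.List.enumerate answers)
            (init := PySem.Dict.empty)).symm]
    rw [PySem.Dict.getD_foldl_insert_add_one]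
    simp [PySem.Dict.getD, PySem.Dict.get?, PySem.Dict.empty]
  unfold pvScore
  simp only [hgetD, Prod.mk.eta]
  rw [pv_sum_count pat]
  rw [List.countP_map]
  have hlt : ∀ q : Int × Int,
      0 ≤ PySem.Int.mod q.1 (pat.length : Int) ∧
      PySem.Int.mod q.1 (pat.length : Int) < (pat.length : Int) := by
    intro q
    have hp : (0 : Int) < (pat.length : Int) := by exact_mod_cast hlen
    rw [show PySem.Int.mod q.1 (pat.length : Int) = q.1 % (pat.length : Int) from
      PySem.Int.mod_eq_emod_of_pos hp]
    exact ⟨Int.emod_nonneg q.1 (by omega), Int.emod_lt_of_pos q.1 hp⟩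
  refine congrArg _ (List.countP_congr ?_)
  intro q _
  simp only [Function.comp]
  have h1 := hlt q
  have h2 : PySem.List.pyGetD pat (PySem.Int.mod q.1 (pat.length : Int)) 0
      = pat.getD (PySem.Int.mod q.1 (pat.length : Int)).toNat 0 := by
    conv_lhs => rw [show PySem.Int.mod q.1 (pat.length : Int)
        = (((PySem.Int.mod q.1 (pat.length : Int)).toNat : Nat) : Int) from by
          have := hlt q; omega]
    rw [PySem.List.pyGetD_natCast]
  simp only [decide_eq_true_eq]
  constructor
  · rintro ⟨_, _, h⟩; rw [h2]; exact h
  · intro h; exact ⟨h1.1, h1.2, by rw [← h2]; exact h⟩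

-- the selection step: A's range(3) append loop = B's filterMap comprehension, for any 3 scores
theorem select_eq (s1 s2 s3 : Int) :
    (PySem.List.pyRange 0 3 1).foldl
      (fun acc i =>
        if PySem.List.pyGetD [s1, s2, s3] i 0 = (PySem.List.max? [s1, s2, s3] id).getD 0
        then acc ++ [i + 1] else acc) []
    = (PySem.List.pyRange 0 3 1).filterMap
        (fun k => if PySem.List.pyGetD [s1, s2, s3] k 0 = (PySem.List.max? [s1, s2, s3] id).getD 0
                  then some (k + 1) else none) := by
  have hr : PySem.List.pyRange 0 3 1 = [0, 1, 2] := by decide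
  rw [hr]
  simp only [List.foldl_cons, List.foldl_nil, List.filterMap_cons, List.filterMap_nil]
  split_ifs <;> simp

-- ===== VERDICT (by name: the statement is the Claim_ definition above) =====
theorem solution_spec : Claim_equal_solution := by
  intro answers _
  unfold Spec_solution solution solution_alt
  simp only []
  have hbridge := foldl_pyRange_eq_foldl_enumerate
    (fun (p : Int × Int × Int) (i : Int) (v : Int) =>
      (if v = PySem.List.pyGetD [1,2,3,4,5] (PySem.Int.mod i 5) 0 then p.1 + 1 else p.1,
       if v = PySem.List.pyGetD [2,1,2,3,2,4,2,5] (PySem.Int.mod i 8) 0 then p.2.1 + 1 else p.2.1,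
       if v = PySem.List.pyGetD [3,3,1,1,2,2,4,4,5,5] (PySem.Int.mod i 10) 0 then p.2.2 + 1 else p.2.2))
    answers answers 0 ((0 : Int), (0 : Int), (0 : Int)) le_rfl
    (fun k _ => by rw [zero_add]; exact PySem.List.pyGetD_natCast answers k 0)
  simp only [zero_add] at hbridge
  rw [hbridge]
  rw [fused_eq_counts
    (fun q => q.2 = PySem.List.pyGetD [1,2,3,4,5] (PySem.Int.mod q.1 5) 0)
    (fun q => q.2 = PySem.List.pyGetD [2,1,2,3,2,4,2,5] (PySem.Int.mod q.1 8) 0)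
    (fun q => q.2 = PySem.List.pyGetD [3,3,1,1,2,2,4,4,5,5] (PySem.Int.mod q.1 10) 0)]
  simp only [List.foldl_cons, List.foldl_nil, List.nil_append]
  have e1 : pvScore [1,2,3,4,5] answers
      = ((PySem.List.enumerate answers).countP
          (fun q => decide (q.2 = PySem.List.pyGetD [1,2,3,4,5] (PySem.Int.mod q.1 5) 0)) : Nat) :=
    pvScore_eq [1,2,3,4,5] (by decide) answers
  have e2 : pvScore [2,1,2,3,2,4,2,5] answers
      = ((PySem.List.enumerate answers).countP
          (fun q => decide (q.2 = PySem.List.pyGetD [2,1,2,3,2,4,2,5] (PySem.Int.mod q.1 8) 0)) : Nat) :=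
    pvScore_eq [2,1,2,3,2,4,2,5] (by decide) answers
  have e3 : pvScore [3,3,1,1,2,2,4,4,5,5] answers
      = ((PySem.List.enumerate answers).countP
          (fun q => decide (q.2 = PySem.List.pyGetD [3,3,1,1,2,2,4,4,5,5] (PySem.Int.mod q.1 10) 0)) : Nat) :=
    pvScore_eq [3,3,1,1,2,2,4,4,5,5] (by decide) answers
  simp only [e1, e2, e3, List.cons_append, List.nil_append, zero_add]
  exact select_eq _ _ _
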